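-- pv_equiv track=rewrite | github.com/mariazlygosteva/Practical-14 | task_12.py | get_words_holes
-- ===== SOURCE A (Python) =====
-- def get_words_holes(words: list[str]) -> list[str]:
--     """
--     Filter words that contain at least two letters with holes.
--
--     Letters with holes are defined as: 'a', 'b', 'd', 'e', 'g', 'o', 'p', 'q'.
--     This function returns a list of words from the input that have at least
--     two such letters.
--
--     Args:
--         words (list[str]): List of words to filter.
--
--     Returns:
--         list[str]: List of words containing at least two letters with holes.
--     """
--     holes_letters = {'a', 'b', 'd', 'e', 'g', 'o', 'p', 'q'}
--     result = []
--
--     for word in words: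
--         hole_count = sum(1 for char in word if char in holes_letters)
--         if hole_count >= 2:
--             result.append(word)
--
--     return result
-- ===== SOURCE B (Python) =====
-- def get_words_holes(words: list[str]) -> list[str]:
--     """Keep words with at least two hole letters, without counting: find the
--     first hole letter, then check only the remaining suffix for a second one
--     (short-circuit two-phase scan)."""
--     holes = "abdegopq"
--
--     def has_second_hole(word):
--         for i, ch in enumerate(word):
--             if ch in holes:
--                 return any(c in holes for c in word[i + 1:])
--         return False
--
--     return [w for w in words if has_second_hole(w)]
-- ===== Notes on version B (the rewrite author's own statement) =====
-- stated objective: alternative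
-- what changed: A counts all hole letters in each word and compares the count with 2; B never counts: it scans for the first hole letter and then short-circuits by asking whether the remaining suffix contains any further hole letter, filtering words with that existence test.
import Mathlib
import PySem

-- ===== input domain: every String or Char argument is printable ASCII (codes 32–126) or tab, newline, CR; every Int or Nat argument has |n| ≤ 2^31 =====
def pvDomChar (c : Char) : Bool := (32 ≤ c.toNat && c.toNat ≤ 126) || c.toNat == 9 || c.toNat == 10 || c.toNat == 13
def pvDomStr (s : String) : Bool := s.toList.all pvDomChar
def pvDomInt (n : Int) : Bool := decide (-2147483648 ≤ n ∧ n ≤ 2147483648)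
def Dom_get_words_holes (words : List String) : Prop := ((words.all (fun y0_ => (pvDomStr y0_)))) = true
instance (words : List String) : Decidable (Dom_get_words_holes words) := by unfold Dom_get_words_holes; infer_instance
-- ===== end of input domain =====

-- B replaces A's hole-letter count per word by a short-circuit two-phase scan
-- (find the first hole letter, then test the suffix for a second); alternative
-- decomposition, same asymptotic cost.


-- ===== PORT A =====
def pvHolesSet : PySem.Set Char := PySem.Set.ofList ['a', 'b', 'd', 'e', 'g', 'o', 'p', 'q']

def get_words_holes (words : List String) : List String :=
  words.foldl (fun result word =>
    let hole_count : Int :=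
      word.toList.foldl (fun s c => if pvHolesSet.contains c then s + 1 else s) 0
    if hole_count ≥ 2 then result ++ [word] else result) []

-- ===== PORT B =====
-- 'ch in holes' with holes = "abdegopq"
def pvIsHole (c : Char) : Bool := "abdegopq".toList.contains c

-- the for/enumerate loop of has_second_hole: first hole letter found → any() on the suffix
def pvHasSecondHole : List Char → Bool
  | [] => false
  | c :: t => if pvIsHole c then t.any pvIsHole else pvHasSecondHole t

def get_words_holes_alt (words : List String) : List String :=
  words.filter (fun w => pvHasSecondHole w.toList)

-- ===== PRECONDITION & SPEC =====
def Spec_get_words_holes (words : List String) (out : List String) : Prop := out = get_words_holes_alt words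
instance (words : List String) (out : List String) : Decidable (Spec_get_words_holes words out) := by unfold Spec_get_words_holes; infer_instance

-- ===== CLAIM (what is proved, stated in full; the proofs are below) =====
def Claim_equal_get_words_holes : Prop := ∀ (words : List String), Dom_get_words_holes words → Spec_get_words_holes words (get_words_holes words)

-- ===== LEMMAS AND PROOFS =====

-- A's set membership and B's string membership are the same test.
theorem pvMem_eq (c : Char) : pvHolesSet.contains c = pvIsHole c := by
  simp [pvHolesSet, pvIsHole, PySem.Set.ofList]

-- A's per-word scan with accumulator a equals a + the count over the word.
theorem pvA_count (l : List Char) (a : Int) :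
    l.foldl (fun s c => if pvHolesSet.contains c then s + 1 else s) a
      = a + ((l.countP (fun c => pvHolesSet.contains c) : Nat) : Int) := by
  induction l generalizing a with
  | nil => simp
  | cons c t ih =>
    simp only [List.foldl_cons, List.countP_cons, ih]
    by_cases h : pvHolesSet.contains c = true
    · rw [if_pos h, if_pos h]; push_cast; ring
    · rw [if_neg h, if_neg h]; push_cast; ring

-- The hole count is the same whichever membership test states it.
theorem pvCountP_eq (l : List Char) :
    l.countP (fun c => pvHolesSet.contains c) = l.countP pvIsHole :=
  List.countP_congr (fun a _ => by rw [pvMem_eq])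

-- B's short-circuit scan decides exactly 'at least two hole letters'.
theorem pvHasSecondHole_eq (l : List Char) :
    pvHasSecondHole l = decide (2 ≤ l.countP pvIsHole) := by
  induction l with
  | nil => simp [pvHasSecondHole]
  | cons c t ih =>
    simp only [pvHasSecondHole, List.countP_cons]
    by_cases h : pvIsHole c = true
    · have hany : t.any pvIsHole = decide (1 ≤ t.countP pvIsHole) := by
        rcases Bool.eq_false_or_eq_true (t.any pvIsHole) with ha | ha <;> rw [ha]
        · obtain ⟨x, hx, hpx⟩ := List.any_eq_true.mp ha
          have hpos : 0 < t.countP pvIsHole := List.countP_pos_iff.mpr ⟨x, hx, hpx⟩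
          exact (decide_eq_true (by omega)).symm
        · have h0 : t.countP pvIsHole = 0 :=
            List.countP_eq_zero.mpr (fun x hx => by simpa using List.any_eq_false.mp ha x hx)
          simp [h0]
      rw [if_pos h, hany]
      simp only [h, if_true, decide_eq_decide]
      omega
    · rw [if_neg h, ih]
      simp [h]

-- A's append-fold with any accumulator is a filter by the count test.
theorem pvFold_eq (ws : List String) (acc : List String) :
    ws.foldl (fun result word =>
      let hole_count : Int :=
        word.toList.foldl (fun s c => if pvHolesSet.contains c then s + 1 else s) 0
      if hole_count ≥ 2 then result ++ [word] else result) acc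
    = acc ++ ws.filter (fun w => pvHasSecondHole w.toList) := by
  induction ws generalizing acc with
  | nil => simp
  | cons w t ih =>
    simp only [List.foldl_cons, List.filter_cons]
    rw [pvA_count, pvCountP_eq, pvHasSecondHole_eq]
    by_cases h : 2 ≤ (w.toList.countP pvIsHole)
    · rw [if_pos (by omega), if_pos (by simpa using h), ih]
      simp
    · rw [if_neg (by omega), if_neg (by simpa using h), ih]

-- ===== VERDICT (by name: the statement is the Claim_ definition above) =====
theorem get_words_holes_spec : Claim_equal_get_words_holes := by
  intro words _
  unfold Spec_get_words_holes get_words_holes get_words_holes_alt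
  simpa using pvFold_eq words []
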